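-- pv_equiv track=rewrite | github.com/ciynkok/bilety_ru | bilety_ru/api/views.py | transform_airport
-- ===== SOURCE A (Python) =====
-- def transform_airport(airport):
--     airport = list(airport)
--     for i in range(1, len(airport)):
--         if airport[i - 1] == ' ':
--             continue
--         airport[i] = airport[i].lower()
--     airport = ''.join(airport)
--     return airport
-- ===== SOURCE B (Python) =====
-- def transform_airport(airport):
--     return ' '.join(word[:1] + word[1:].lower() for word in airport.split(' '))
-- ===== Notes on version B (the rewrite author's own statement) =====
-- stated objective: simpler
-- what changed: Replaces A's in-place char-by-char loop guarded by a lookback index test against the previous character by a word-level pipeline: split on the space separator, keep each word's first character, lowercase the rest of the word, and join the words back with the separator.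
import Mathlib
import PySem

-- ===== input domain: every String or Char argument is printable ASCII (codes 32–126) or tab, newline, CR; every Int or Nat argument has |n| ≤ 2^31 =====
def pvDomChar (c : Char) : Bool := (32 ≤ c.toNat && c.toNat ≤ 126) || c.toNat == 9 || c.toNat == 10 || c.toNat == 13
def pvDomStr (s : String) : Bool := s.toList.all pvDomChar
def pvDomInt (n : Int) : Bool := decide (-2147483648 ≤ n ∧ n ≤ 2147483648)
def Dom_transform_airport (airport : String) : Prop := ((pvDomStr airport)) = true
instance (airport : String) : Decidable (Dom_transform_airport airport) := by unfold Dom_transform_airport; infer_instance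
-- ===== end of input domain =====

-- B rewrites A's lookback-indexed in-place char loop as split-on-space / per-word lowercase-tail / join (objective: simpler).

-- ===== PORT A =====
-- Python A: airport = list(airport); for i in range(1, len(airport)): if airport[i-1]==' ': continue; airport[i] = airport[i].lower(); return ''.join(airport)
-- The loop reads and writes only indices in [0, len), so reads are PySem.List.pyGetD (the default is
-- never used) and the always-in-range assignment airport[i] = v is List.set i.toNat v (exact there).
def transform_airport (airport : String) : String :=
  let cs := airport.toList
  let res := (PySem.List.pyRange 1 (PySem.List.len cs) 1).foldl
    (fun (s : List Char) (i : Int) =>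
      if PySem.List.pyGetD s (i - 1) ' ' = ' ' then s
      else s.set i.toNat (PySem.Chars.lowerChar (PySem.List.pyGetD s i ' ')))
    cs
  String.mk res

-- ===== PORT B =====
-- Python B: return ' '.join(word[:1] + word[1:].lower() for word in airport.split(' '))
def transform_airport_alt (airport : String) : String :=
  let words := PySem.Chars.splitOn airport.toList [' ']
  String.mk (PySem.Chars.join [' ']
    (words.map (fun w =>
      PySem.List.slice w none (some 1) ++ PySem.Chars.lower (PySem.List.slice w (some 1) none))))

-- ===== PRECONDITION & SPEC =====
def Spec_transform_airport (airport : String) (out : String) : Prop := out = transform_airport_alt airport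
instance (airport : String) (out : String) : Decidable (Spec_transform_airport airport out) := by unfold Spec_transform_airport; infer_instance

-- ===== CLAIM (what is proved, stated in full; the proofs are below) =====
def Claim_equal_transform_airport : Prop := ∀ (airport : String), Dom_transform_airport airport → Spec_transform_airport airport (transform_airport airport)

-- ===== LEMMAS AND PROOFS =====

-- Common specification: process the chars after position 0; `prev` is the already-processed previous char.
def pvGo (prev : Char) : List Char → List Char
  | [] => []
  | c :: rest =>
    let c' := if prev = ' ' then c else PySem.Chars.lowerChar c
    c' :: pvGo c' rest

lemma pvLowerChar_space : PySem.Chars.lowerChar ' ' = ' ' := by decide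

lemma pvLowerChar_ne_space {c : Char} (h : c ≠ ' ') : PySem.Chars.lowerChar c ≠ ' ' := by
  unfold PySem.Chars.lowerChar
  split_ifs with hu
  · simp [PySem.Chars.isupper] at hu
    intro heq
    have h65 : 65 ≤ c.toNat := hu.1
    have h90 : c.toNat ≤ 90 := hu.2
    have hv : (Char.ofNat (c.toNat + 32)).toNat = c.toNat + 32 := by
      rw [Char.toNat_ofNat, if_pos]
      exact Or.inl (by omega)
    have h32 : (Char.ofNat (c.toNat + 32)).toNat = 32 := by rw [heq]; decide
    omega
  · exact h

-- ---- A side: the fold computes pvGo ----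
lemma pvFoldA (rest : List Char) : ∀ (done : List Char) (hne : done ≠ []),
    (PySem.List.pyRange (done.length : Int) ((done.length : Int) + rest.length) 1).foldl
      (fun (s : List Char) (i : Int) =>
        if PySem.List.pyGetD s (i - 1) ' ' = ' ' then s
        else s.set i.toNat (PySem.Chars.lowerChar (PySem.List.pyGetD s i ' ')))
      (done ++ rest)
    = done ++ pvGo (done.getLast hne) rest := by
  induction rest with
  | nil =>
    intro done hne
    rw [show ((done.length : Int) + ([] : List Char).length) = (done.length : Int) by simp,
        PySem.List.pyRange_one_eq_nil le_rfl]
    simp [pvGo]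
  | cons c rs ih =>
    intro done hne
    have hpos : 0 < done.length := List.length_pos_iff.mpr hne
    have hlt : (done.length : Int) < (done.length : Int) + (c :: rs).length := by
      simp only [List.length_cons]; push_cast; omega
    rw [PySem.List.pyRange_one_cons hlt, List.foldl_cons]
    have hprev : PySem.List.pyGetD (done ++ c :: rs) ((done.length : Int) - 1) ' '
        = done.getLast hne := by
      have h1 : ((done.length : Int) - 1) = ((done.length - 1 : Nat) : Int) := by
        omega
      rw [h1, PySem.List.pyGetD_natCast]
      rw [List.getD_eq_getElem?_getD]
      rw [List.getElem?_append_left (by omega)]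
      rw [List.getLast_eq_getElem]
      simp [List.getElem?_eq_getElem (by omega : done.length - 1 < done.length)]
    by_cases hsp : done.getLast hne = ' '
    · rw [if_pos (by rw [hprev]; exact hsp)]
      have hres := ih (done ++ [c]) (by simp)
      have hlen : ((done ++ [c]).length : Int) = (done.length : Int) + 1 := by simp
      rw [List.append_assoc] at hres
      simp only [List.singleton_append] at hres
      rw [hlen] at hres
      have harr : ((done.length : Int) + ((c :: rs).length : Nat)) = (done.length : Int) + 1 + (rs.length : Nat) := by
        simp only [List.length_cons]; push_cast; ring
      rw [harr, hres]
      have hlast : (done ++ [c]).getLast (by simp) = c := by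
        simp
      rw [hlast]
      simp only [pvGo, if_pos hsp]
      simp
    · rw [if_neg (by rw [hprev]; exact hsp)]
      have hget : PySem.List.pyGetD (done ++ c :: rs) ((done.length : Int)) ' ' = c := by
        rw [PySem.List.pyGetD_natCast, List.getD_eq_getElem?_getD]
        simp
      rw [hget]
      have hset : (done ++ c :: rs).set ((done.length : Int)).toNat (PySem.Chars.lowerChar c)
          = done ++ PySem.Chars.lowerChar c :: rs := by
        rw [Int.toNat_natCast]
        rw [List.set_append_right _ _ (le_refl _)]
        simp
      rw [hset]
      have hres := ih (done ++ [PySem.Chars.lowerChar c]) (by simp)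
      have hlen : ((done ++ [PySem.Chars.lowerChar c]).length : Int) = (done.length : Int) + 1 := by simp
      rw [List.append_assoc] at hres
      simp only [List.singleton_append] at hres
      rw [hlen] at hres
      have harr : ((done.length : Int) + ((c :: rs).length : Nat)) = (done.length : Int) + 1 + (rs.length : Nat) := by
        simp only [List.length_cons]; push_cast; ring
      rw [harr, hres]
      have hlast : (done ++ [PySem.Chars.lowerChar c]).getLast (by simp) = PySem.Chars.lowerChar c := by
        simp
      rw [hlast]
      simp only [pvGo, if_neg hsp]
      simp

lemma pvA_list (cs : List Char) :
    (PySem.List.pyRange 1 (PySem.List.len cs) 1).foldl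
      (fun (s : List Char) (i : Int) =>
        if PySem.List.pyGetD s (i - 1) ' ' = ' ' then s
        else s.set i.toNat (PySem.Chars.lowerChar (PySem.List.pyGetD s i ' ')))
      cs
    = pvGo ' ' cs := by
  cases cs with
  | nil =>
    rw [PySem.List.pyRange_one_eq_nil (by simp [PySem.List.len])]
    simp [pvGo]
  | cons h t =>
    have hres := pvFoldA t [h] (by simp)
    simp only [List.length_cons, List.length_nil, Nat.zero_add, Nat.cast_one,
      List.singleton_append, List.getLast_singleton] at hres
    rw [show PySem.List.len (h :: t) = 1 + (t.length : Int) by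
      simp [PySem.List.len]; ring]
    rw [hres]
    simp [pvGo]

lemma pvA_eq (airport : String) :
    transform_airport airport = String.mk (pvGo ' ' airport.toList) :=
  congrArg String.mk (pvA_list airport.toList)

-- ---- B side ----
-- structural model of Python str.split(' ')
def pvSplit : List Char → List (List Char)
  | [] => [[]]
  | c :: rest =>
    if c = ' ' then [] :: pvSplit rest
    else
      match pvSplit rest with
      | [] => [[c]]
      | w :: ws => (c :: w) :: ws

lemma pvSplit_ne_nil (l : List Char) : pvSplit l ≠ [] := by
  cases l with
  | nil => simp [pvSplit]
  | cons c rest =>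
    unfold pvSplit
    split_ifs
    · simp
    · cases pvSplit rest <;> simp

lemma pvSplitOn_go (l : List Char) : ∀ (fuel : Nat), l.length < fuel → ∀ (cur : List Char) (acc : List (List Char)),
    PySem.Chars.splitOn.go [' '] fuel l cur acc
    = acc.reverse ++ ((cur.reverse ++ (pvSplit l).headI) :: (pvSplit l).tail) := by
  induction l with
  | nil =>
    intro fuel hf cur acc
    cases fuel with
    | zero => omega
    | succ f => simp [PySem.Chars.splitOn.go, pvSplit]
  | cons c rest ih =>
    intro fuel hf cur acc
    cases fuel with
    | zero => omega
    | succ f =>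
      by_cases hc : c = ' '
      · subst hc
        rw [show PySem.Chars.splitOn.go [' '] (f+1) (' ' :: rest) cur acc
            = PySem.Chars.splitOn.go [' '] f rest [] (cur.reverse :: acc) by
          simp [PySem.Chars.splitOn.go, List.isPrefixOf]]
        rw [ih f (by simp at hf; omega) [] (cur.reverse :: acc)]
        cases hsp : pvSplit rest with
        | nil => exact absurd hsp (pvSplit_ne_nil rest)
        | cons w ws => simp [pvSplit, hsp]
      · have hpre : ([' '] : List Char).isPrefixOf (c :: rest) = false := by
          simp [List.isPrefixOf]
          exact fun h => hc h.symm
        rw [show PySem.Chars.splitOn.go [' '] (f+1) (c :: rest) cur acc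
            = PySem.Chars.splitOn.go [' '] f rest (c :: cur) acc by
          simp [PySem.Chars.splitOn.go, hpre]]
        rw [ih f (by simp at hf; omega) (c :: cur) acc]
        cases hsp : pvSplit rest with
        | nil => exact absurd hsp (pvSplit_ne_nil rest)
        | cons w ws => simp [pvSplit, hc, hsp]

lemma pvSplitOn_eq (l : List Char) :
    PySem.Chars.splitOn l [' '] = pvSplit l := by
  unfold PySem.Chars.splitOn
  rw [pvSplitOn_go l (l.length + 1) (by omega) [] []]
  cases hsp : pvSplit l with
  | nil => exact absurd hsp (pvSplit_ne_nil l)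
  | cons w ws => simp

-- per-word transform of B, on the list level
def pvF (w : List Char) : List Char :=
  PySem.List.slice w none (some 1) ++ PySem.Chars.lower (PySem.List.slice w (some 1) none)

lemma pvF_nil : pvF [] = [] := by decide

lemma pvF_cons (a : Char) (r : List Char) : pvF (a :: r) = a :: PySem.Chars.lower r := by
  unfold pvF
  rw [PySem.List.slice_to _ (by omega), PySem.List.slice_from _ (by omega)]
  simp

lemma pvJoin_cons_head (a : Char) (x : List Char) (l : List (List Char)) :
    PySem.Chars.join [' '] ((a :: x) :: l) = a :: PySem.Chars.join [' '] (x :: l) := by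
  cases l with
  | nil => simp [PySem.Chars.join_singleton]
  | cons y ys => rw [PySem.Chars.join_cons_cons, PySem.Chars.join_cons_cons]; simp

-- joint induction: left = start/post-space mode, right = inside-word mode
lemma pvMain (cs : List Char) :
    (PySem.Chars.join [' '] ((pvSplit cs).map pvF) = pvGo ' ' cs)
    ∧ (∀ prev, prev ≠ ' ' →
        pvGo prev cs
        = PySem.Chars.join [' ']
            (PySem.Chars.lower ((pvSplit cs).headI) :: ((pvSplit cs).tail).map pvF)) := by
  induction cs with
  | nil =>
    constructor
    · simp [pvSplit, pvGo, pvF_nil, PySem.Chars.join_singleton]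
    · intro prev _
      simp [pvSplit, pvGo, PySem.Chars.lower, PySem.Chars.join_singleton]
  | cons c rest ih =>
    obtain ⟨ihS, ihN⟩ := ih
    by_cases hc : c = ' '
    · subst hc
      have hJ : PySem.Chars.join [' '] ([] :: (pvSplit rest).map pvF) = ' ' :: pvGo ' ' rest := by
        cases hsp : pvSplit rest with
        | nil => exact absurd hsp (pvSplit_ne_nil rest)
        | cons w ws =>
          rw [List.map_cons, PySem.Chars.join_cons_cons]
          have hS := ihS
          rw [hsp, List.map_cons] at hS
          rw [hS]
          simp
      constructor
      · rw [show pvSplit (' ' :: rest) = [] :: pvSplit rest from by simp [pvSplit]]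
        rw [List.map_cons, pvF_nil, hJ]
        simp [pvGo]
      · intro prev hprev
        rw [show pvSplit (' ' :: rest) = [] :: pvSplit rest from by simp [pvSplit]]
        simp only [List.headI, List.tail]
        rw [show PySem.Chars.lower [] = [] from rfl, hJ]
        simp [pvGo, pvLowerChar_space]
    · cases hsp : pvSplit rest with
      | nil => exact absurd hsp (pvSplit_ne_nil rest)
      | cons w ws =>
        have hsplit : pvSplit (c :: rest) = (c :: w) :: ws := by
          simp [pvSplit, hc, hsp]
        have hN := ihN c hc
        rw [hsp] at hN
        simp only [List.headI, List.tail] at hN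
        constructor
        · rw [hsplit, List.map_cons, pvF_cons, pvJoin_cons_head]
          rw [← hN]
          simp [pvGo]
        · intro prev hprev
          have hN' := ihN (PySem.Chars.lowerChar c) (pvLowerChar_ne_space hc)
          rw [hsp] at hN'
          simp only [List.headI, List.tail] at hN'
          rw [hsplit]
          simp only [List.headI, List.tail]
          rw [show PySem.Chars.lower (c :: w) = PySem.Chars.lowerChar c :: PySem.Chars.lower w from rfl]
          rw [pvJoin_cons_head, ← hN']
          simp [pvGo, if_neg hprev]

lemma pvB_eq (airport : String) :
    transform_airport_alt airport = String.mk (pvGo ' ' airport.toList) := by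
  have h : PySem.Chars.join [' ']
      ((PySem.Chars.splitOn airport.toList [' ']).map (fun w =>
        PySem.List.slice w none (some 1) ++ PySem.Chars.lower (PySem.List.slice w (some 1) none)))
      = pvGo ' ' airport.toList := by
    rw [pvSplitOn_eq]
    rw [show (fun w => PySem.List.slice w none (some 1) ++ PySem.Chars.lower (PySem.List.slice w (some 1) none)) = pvF from rfl]
    exact (pvMain airport.toList).1
  exact congrArg String.mk h

-- ===== VERDICT (by name: the statement is the Claim_ definition above) =====
theorem transform_airport_spec : Claim_equal_transform_airport := by
  intro airport _
  unfold Spec_transform_airport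
  rw [pvA_eq, pvB_eq]
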